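-- pv_equiv track=rewrite | github.com/launchplugai/BetApp | app/pipeline.py | _compute_volatility_flag
-- ===== SOURCE A (Python) =====
-- def _compute_volatility_flag(markets: list[str], leg_count: int, same_game_count: int) -> str:
--     """
--     Compute volatility flag based on market types and structure.
--
--     Rules (heuristic, deterministic):
--     - Props = High base
--     - Totals = Med-High base
--     - Spreads = Med base
--     - ML = Low-Med base
--     - Boosters: same-game stack +1, 4+ legs +1
--     - Cap at High
--
--     Returns: "low", "medium", "med-high", or "high"
--     """
--     # Base volatility from market types
--     base_scores = {
--         "points": 3, "rebounds": 3, "assists": 3, "td": 3, "yardage": 3,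
--         "threes": 3, "steals": 3, "blocks": 3, "strikeouts": 3, "hr": 3,
--         "hits": 3, "rbi": 3, "prop": 3,  # Props = High
--         "total": 2,  # Totals = Med-High
--         "spread": 1,  # Spreads = Med
--         "ml": 0,  # ML = Low-Med
--     }
--
--     # Compute max base score from markets
--     market_score = 0
--     for m in markets:
--         market_score = max(market_score, base_scores.get(m, 0))
--
--     # If no markets detected, use neutral
--     if not markets:
--         market_score = 1
--
--     # Boosters
--     booster = 0
--     if same_game_count >= 2:
--         booster += 1  # Same-game stack
--     if leg_count >= 4:
--         booster += 1  # 4+ legs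
--
--     total_score = market_score + booster
--
--     # Map to labels (cap at high)
--     if total_score >= 3:
--         return "high"
--     elif total_score == 2:
--         return "med-high"
--     elif total_score == 1:
--         return "medium"
--     else:
--         return "low"
-- ===== SOURCE B (Python) =====
-- PROP_MARKETS = frozenset({
--     "points", "rebounds", "assists", "td", "yardage",
--     "threes", "steals", "blocks", "strikeouts", "hr",
--     "hits", "rbi", "prop",
-- })
--
-- LABELS = ("low", "medium", "med-high", "high")
--
--
-- def _compute_volatility_flag(markets: list, leg_count: int, same_game_count: int) -> str:
--     seen = set(markets)
--     if not markets:
--         tier = 1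
--     elif seen & PROP_MARKETS:
--         tier = 3
--     elif "total" in seen:
--         tier = 2
--     elif "spread" in seen:
--         tier = 1
--     else:
--         tier = 0
--     tier += (same_game_count >= 2) + (leg_count >= 4)
--     return LABELS[min(tier, 3)]
-- ===== Notes on version B (the rewrite author's own statement) =====
-- stated objective: simpler
-- what changed: Replaces the max-fold over a 16-entry score dict with a set built once and a descending if/elif membership chain (prop-set intersection, then 'total', then 'spread'), and replaces the threshold if/elif label chain with direct indexing into a label table via min(tier, 3).
import Mathlib
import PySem

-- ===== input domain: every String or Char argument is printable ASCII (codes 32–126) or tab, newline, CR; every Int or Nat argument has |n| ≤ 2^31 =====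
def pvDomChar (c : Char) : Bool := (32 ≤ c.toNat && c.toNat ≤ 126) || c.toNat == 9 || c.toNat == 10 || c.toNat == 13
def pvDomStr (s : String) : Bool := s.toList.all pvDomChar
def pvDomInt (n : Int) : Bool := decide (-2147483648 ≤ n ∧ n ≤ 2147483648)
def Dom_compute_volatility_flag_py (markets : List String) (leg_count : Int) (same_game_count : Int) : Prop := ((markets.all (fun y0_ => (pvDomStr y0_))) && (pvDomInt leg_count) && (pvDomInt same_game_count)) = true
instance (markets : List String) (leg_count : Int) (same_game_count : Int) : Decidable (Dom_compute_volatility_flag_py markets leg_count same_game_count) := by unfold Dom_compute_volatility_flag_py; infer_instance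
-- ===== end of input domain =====

-- B replaces A's max-fold over a score dict by a set built once and a descending membership
-- chain, and the threshold label chain by indexing a label table (objective: simpler).


-- ===== PORT A =====
-- base_scores dict literal from A
def pvBaseScores : PySem.Dict String Int := PySem.Dict.ofList
  [("points", 3), ("rebounds", 3), ("assists", 3), ("td", 3), ("yardage", 3),
   ("threes", 3), ("steals", 3), ("blocks", 3), ("strikeouts", 3), ("hr", 3),
   ("hits", 3), ("rbi", 3), ("prop", 3),
   ("total", 2),
   ("spread", 1),
   ("ml", 0)]

def compute_volatility_flag_py (markets : List String) (leg_count : Int) (same_game_count : Int) : String :=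
  let market_score : Int := markets.foldl (fun acc m => max acc (pvBaseScores.getD m 0)) 0
  let market_score : Int := if markets = [] then 1 else market_score
  let booster : Int := (if same_game_count >= 2 then 1 else 0) + (if leg_count >= 4 then 1 else 0)
  let total_score : Int := market_score + booster
  if total_score >= 3 then "high"
  else if total_score = 2 then "med-high"
  else if total_score = 1 then "medium"
  else "low"

-- ===== PORT B =====
def pvPropMarkets : PySem.Set String := PySem.Set.ofList
  ["points", "rebounds", "assists", "td", "yardage",
   "threes", "steals", "blocks", "strikeouts", "hr",
   "hits", "rbi", "prop"]

def pvLabels : List String := ["low", "medium", "med-high", "high"]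

def compute_volatility_flag_py_alt (markets : List String) (leg_count : Int) (same_game_count : Int) : String :=
  let seen : PySem.Set String := PySem.Set.ofList markets
  let tier : Int :=
    if markets = [] then 1
    else if PySem.Set.inter seen pvPropMarkets ≠ [] then 3
    else if seen.contains "total" then 2
    else if seen.contains "spread" then 1
    else 0
  let tier : Int := tier + (if same_game_count >= 2 then 1 else 0) + (if leg_count >= 4 then 1 else 0)
  -- LABELS[min(tier, 3)]: tier is always in [0, 5], so min tier 3 is in range and
  -- Python never raises; pyGetD with an unreachable default is the total form.
  PySem.List.pyGetD pvLabels (min tier 3) ""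

-- ===== PRECONDITION & SPEC =====
def Spec_compute_volatility_flag_py (markets : List String) (leg_count : Int) (same_game_count : Int) (out : String) : Prop := out = compute_volatility_flag_py_alt markets leg_count same_game_count
instance (markets : List String) (leg_count : Int) (same_game_count : Int) (out : String) : Decidable (Spec_compute_volatility_flag_py markets leg_count same_game_count out) := by unfold Spec_compute_volatility_flag_py; infer_instance

-- ===== CLAIM (what is proved, stated in full; the proofs are below) =====
def Claim_equal_compute_volatility_flag_py : Prop := ∀ (markets : List String) (leg_count : Int) (same_game_count : Int), Dom_compute_volatility_flag_py markets leg_count same_game_count → Spec_compute_volatility_flag_py markets leg_count same_game_count (compute_volatility_flag_py markets leg_count same_game_count)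

-- ===== LEMMAS AND PROOFS =====

-- score of a single market (A's dict lookup) rewritten as B's membership chain
def pvScore (m : String) : Int :=
  if m ∈ pvPropMarkets then 3 else if m = "total" then 2 else if m = "spread" then 1 else 0

lemma pvPropMarkets_eq : pvPropMarkets =
    ["points", "rebounds", "assists", "td", "yardage", "threes", "steals", "blocks",
     "strikeouts", "hr", "hits", "rbi", "prop"] := by decide

lemma pvScore_eq_getD (m : String) : pvBaseScores.getD m 0 = pvScore m := by
  by_cases h : m ∈ (["points", "rebounds", "assists", "td", "yardage", "threes", "steals",
      "blocks", "strikeouts", "hr", "hits", "rbi", "prop", "total", "spread", "ml"] : List String)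
  · simp only [List.mem_cons, List.not_mem_nil, or_false] at h
    rcases h with rfl|rfl|rfl|rfl|rfl|rfl|rfl|rfl|rfl|rfl|rfl|rfl|rfl|rfl|rfl|rfl <;> decide
  · simp only [List.mem_cons, List.not_mem_nil, or_false, not_or] at h
    obtain ⟨n1, n2, n3, n4, n5, n6, n7, n8, n9, n10, n11, n12, n13, n14, n15, n16⟩ := h
    have e1 : ("points" == m) = false := beq_eq_false_iff_ne.mpr (Ne.symm n1)
    have e2 : ("rebounds" == m) = false := beq_eq_false_iff_ne.mpr (Ne.symm n2)
    have e3 : ("assists" == m) = false := beq_eq_false_iff_ne.mpr (Ne.symm n3)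
    have e4 : ("td" == m) = false := beq_eq_false_iff_ne.mpr (Ne.symm n4)
    have e5 : ("yardage" == m) = false := beq_eq_false_iff_ne.mpr (Ne.symm n5)
    have e6 : ("threes" == m) = false := beq_eq_false_iff_ne.mpr (Ne.symm n6)
    have e7 : ("steals" == m) = false := beq_eq_false_iff_ne.mpr (Ne.symm n7)
    have e8 : ("blocks" == m) = false := beq_eq_false_iff_ne.mpr (Ne.symm n8)
    have e9 : ("strikeouts" == m) = false := beq_eq_false_iff_ne.mpr (Ne.symm n9)
    have e10 : ("hr" == m) = false := beq_eq_false_iff_ne.mpr (Ne.symm n10)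
    have e11 : ("hits" == m) = false := beq_eq_false_iff_ne.mpr (Ne.symm n11)
    have e12 : ("rbi" == m) = false := beq_eq_false_iff_ne.mpr (Ne.symm n12)
    have e13 : ("prop" == m) = false := beq_eq_false_iff_ne.mpr (Ne.symm n13)
    have e14 : ("total" == m) = false := beq_eq_false_iff_ne.mpr (Ne.symm n14)
    have e15 : ("spread" == m) = false := beq_eq_false_iff_ne.mpr (Ne.symm n15)
    have e16 : ("ml" == m) = false := beq_eq_false_iff_ne.mpr (Ne.symm n16)
    simp [pvBaseScores, PySem.Dict.getD, PySem.Dict.get?, PySem.Dict.ofList, PySem.Dict.update,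
          PySem.Dict.empty, PySem.Dict.insert, List.find?, pvScore, pvPropMarkets_eq, List.mem_cons,
          e1, e2, e3, e4, e5, e6, e7, e8, e9, e10, e11, e12, e13, e14, e15, e16, n1, n2, n3, n4, n5, n6, n7, n8, n9, n10, n11, n12, n13, n14, n15]

lemma pvScore_range (m : String) : 0 ≤ pvScore m ∧ pvScore m ≤ 3 := by
  unfold pvScore; split_ifs <;> omega

lemma pvFold_shift (l : List String) (a : Int) (ha : 0 ≤ a) :
    l.foldl (fun acc m => max acc (pvScore m)) a = max a (l.foldl (fun acc m => max acc (pvScore m)) 0) := by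
  induction l generalizing a with
  | nil => simp; omega
  | cons x xs ih =>
    simp only [List.foldl_cons]
    have hx := pvScore_range x
    rw [ih (max a (pvScore x)) (by omega), ih (max 0 (pvScore x)) (by omega)]
    omega

-- the three membership conditions of B, at the raw-list level
lemma pvInter_ne_nil_iff (l : List String) :
    PySem.Set.inter (PySem.Set.ofList l) pvPropMarkets ≠ [] ↔ ∃ m ∈ l, m ∈ pvPropMarkets := by
  rw [Ne, List.eq_nil_iff_forall_not_mem]
  constructor
  · intro h
    push Not at h
    obtain ⟨x, hx⟩ := h
    rw [PySem.Set.mem_inter, PySem.Set.mem_ofList] at hx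
    exact ⟨x, hx.1, hx.2⟩
  · rintro ⟨m, hm, hp⟩ h
    exact h m (by rw [PySem.Set.mem_inter, PySem.Set.mem_ofList]; exact ⟨hm, hp⟩)

lemma pvContains_ofList (l : List String) (x : String) :
    (PySem.Set.ofList l).contains x = true ↔ x ∈ l := by
  rw [PySem.Set.contains_iff, PySem.Set.mem_ofList]

lemma pvFold_eq_tier (l : List String) :
    l.foldl (fun acc m => max acc (pvScore m)) 0 =
      (if PySem.Set.inter (PySem.Set.ofList l) pvPropMarkets ≠ [] then 3
       else if (PySem.Set.ofList l).contains "total" then 2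
       else if (PySem.Set.ofList l).contains "spread" then 1
       else (0 : Int)) := by
  simp only [pvInter_ne_nil_iff, pvContains_ofList]
  induction l with
  | nil => simp
  | cons x xs ih =>
    simp only [List.foldl_cons]
    rw [pvFold_shift xs (max 0 (pvScore x)) (by have := pvScore_range x; omega), ih]
    simp only [List.mem_cons]
    have hT : "total" ∉ pvPropMarkets := by decide
    have hS : "spread" ∉ pvPropMarkets := by decide
    by_cases h1 : x ∈ pvPropMarkets <;> by_cases h2 : x = "total" <;> by_cases h3 : x = "spread" <;>
      by_cases h4 : ∃ m ∈ xs, m ∈ pvPropMarkets <;> by_cases h5 : "total" ∈ xs <;>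
      by_cases h6 : "spread" ∈ xs <;>
      simp_all [pvScore] <;> (try (split_ifs <;> simp_all))

-- ===== VERDICT (by name: the statement is the Claim_ definition above) =====
theorem compute_volatility_flag_py_spec : Claim_equal_compute_volatility_flag_py := by
  intro markets leg_count same_game_count _
  unfold Spec_compute_volatility_flag_py compute_volatility_flag_py compute_volatility_flag_py_alt
  simp only [funext fun acc => funext fun m => congrArg (max acc) (pvScore_eq_getD m)]
  rw [pvFold_eq_tier]
  generalize hgen : (if markets = [] then (1 : Int)
      else if PySem.Set.inter (PySem.Set.ofList markets) pvPropMarkets ≠ [] then 3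
      else if (PySem.Set.ofList markets).contains "total" then 2
      else if (PySem.Set.ofList markets).contains "spread" then 1
      else (0 : Int)) = t
  have hrange : 0 ≤ t ∧ t ≤ 3 := by rw [← hgen]; split_ifs <;> omega
  obtain ⟨h0, h3'⟩ := hrange
  interval_cases t <;> by_cases h4 : same_game_count ≥ 2 <;> by_cases h5 : leg_count ≥ 4 <;>
    simp only [h4, h5, if_true, if_false] <;>
    norm_num [pvLabels, PySem.List.pyGetD, PySem.List.pyGet?, PySem.List.pyIdx?] <;> rfl
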